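-- pv_equiv track=rewrite | github.com/jbkim0526/Problem_Solving | 프로그래머스/Level2/97. 땅따먹기/sol.py | solution
-- ===== SOURCE A (Python) =====
-- def solution(land):
--     n = len(land)
--     dp = [land[0]]+[[0,0,0,0] for _ in range(n-1)]
--
--     for i in range(1,n):
--         for j in range(4):
--             x,y,z = tuple(x for x in [0,1,2,3] if x != j)
--             dp[i][j] = max(dp[i-1][x],dp[i-1][y],dp[i-1][z])+land[i][j]
--     return max(dp[n-1])
-- ===== SOURCE B (Python) =====
-- def solution(land):
--     prev = land[0]
--     for row in land[1:]:
--         m1 = m2 = None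
--         arg = -1
--         for j in range(4):
--             v = prev[j]
--             if m1 is None or v > m1:
--                 m2 = m1
--                 m1 = v
--                 arg = j
--             elif m2 is None or v > m2:
--                 m2 = v
--         prev = [row[j] + (m2 if j == arg else m1) for j in range(4)]
--     return max(prev)
-- ===== Notes on version B (the rewrite author's own statement) =====
-- stated objective: alternative
-- what changed: Replaces the full dp table and per-cell scan of the three other columns with a rolling previous row plus a single top-2 (max, argmax, second-max) scan per row, adding second-max only at the argmax column.
import Mathlib
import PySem

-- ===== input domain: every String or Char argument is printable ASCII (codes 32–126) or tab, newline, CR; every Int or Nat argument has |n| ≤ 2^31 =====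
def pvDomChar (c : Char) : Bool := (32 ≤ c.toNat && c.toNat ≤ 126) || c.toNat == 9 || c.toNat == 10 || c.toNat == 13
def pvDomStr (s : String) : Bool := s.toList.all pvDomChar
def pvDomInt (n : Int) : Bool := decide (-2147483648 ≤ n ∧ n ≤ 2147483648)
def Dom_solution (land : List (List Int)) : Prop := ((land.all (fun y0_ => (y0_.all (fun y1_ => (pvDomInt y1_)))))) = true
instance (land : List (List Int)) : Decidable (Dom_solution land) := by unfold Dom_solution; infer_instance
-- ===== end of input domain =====

-- B keeps only the previous dp row and does one top-2 (max/argmax/second-max) scan per row,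
-- instead of A's full dp table with a per-cell scan of the three other columns.

-- ===== PORT A =====
-- inner 'for j in range(4)' loop: dp[i][j] = max(dp[i-1][x],dp[i-1][y],dp[i-1][z])+land[i][j];
-- indexing totalized with defaults, Pre_solution excludes exactly the inputs where Python raises
def pvInner (prev row r : List Int) : List Int :=
  (List.range 4).foldl (fun r j =>
    let others := ([0,1,2,3].filter (fun x => x ≠ j))
    let x := others.getD 0 0
    let y := others.getD 1 0
    let z := others.getD 2 0
    r.set j (max (max (prev.getD x 0) (prev.getD y 0)) (prev.getD z 0) + row.getD j 0)) r

def solution (land : List (List Int)) : Int :=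
  let n := land.length
  let dp : List (List Int) :=
    [(PySem.List.pyGet? land 0).getD []] ++ (List.range (n-1)).map (fun _ => ([0,0,0,0] : List Int))
  let dp := (List.range' 1 (n-1)).foldl (fun dp i =>
      dp.set i (pvInner (dp.getD (i-1) []) (land.getD i []) (dp.getD i []))) dp
  (PySem.List.max? (dp.getD (n-1) []) (fun x => x)).getD 0

-- ===== PORT B =====
-- one step of B's top-2 scan: state = (m1, m2, arg), Python's None ported as Option.none
def pvTop2Step (prev : List Int) (s : Option Int × Option Int × Int) (j : Nat) : Option Int × Option Int × Int :=
  let v := prev.getD j 0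
  if s.1 = none ∨ v > s.1.getD 0 then (some v, s.1, (j : Int))
  else if s.2.1 = none ∨ v > s.2.1.getD 0 then (s.1, some v, s.2.2)
  else s

def pvStepB (prev row : List Int) : List Int :=
  let s := (List.range 4).foldl (pvTop2Step prev) (none, none, -1)
  (List.range 4).map (fun j => row.getD j 0 + (if (j : Int) = s.2.2 then (s.2.1).getD 0 else (s.1).getD 0))

def solution_alt (land : List (List Int)) : Int :=
  let prev := (land.drop 1).foldl (fun prev row => pvStepB prev row) (land.headD [])
  (PySem.List.max? prev (fun x => x)).getD 0

-- ===== PRECONDITION & SPEC =====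
-- exactly where the Python A returns: a single nonempty row, or ≥ 2 rows each of length ≥ 4
def Pre_solution (land : List (List Int)) : Prop :=
  (land.length = 1 ∧ land.headD [] ≠ []) ∨ (2 ≤ land.length ∧ ∀ row ∈ land, 4 ≤ row.length)
instance (land : List (List Int)) : Decidable (Pre_solution land) := by unfold Pre_solution; infer_instance
def pvWitness_solution : List (List Int) := [[1,2,3,4],[5,6,7,8]]
def Spec_solution (land : List (List Int)) (out : Int) : Prop := out = solution_alt land
instance (land : List (List Int)) (out : Int) : Decidable (Spec_solution land out) := by unfold Spec_solution; infer_instance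

-- ===== CLAIM (what is proved, stated in full; the proofs are below) =====
def Claim_equal_solution : Prop := ∀ (land : List (List Int)), Dom_solution land → Pre_solution land → Spec_solution land (solution land)

-- ===== LEMMAS AND PROOFS =====

lemma top2_step0 (p : List Int) : pvTop2Step p (none, none, -1) 0 = (some (p.getD 0 0), none, 0) := by
  simp [pvTop2Step]

lemma top2_step1 (p : List Int) (a : Int) : pvTop2Step p (some a, none, 0) 1 =
    if p.getD 1 0 > a then (some (p.getD 1 0), some a, 1) else (some a, some (p.getD 1 0), 0) := by
  by_cases h : p.getD 1 0 > a <;> simp [pvTop2Step]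

lemma top2_full (p : List Int) (m1 m2 arg : Int) (j : Nat) :
    pvTop2Step p (some m1, some m2, arg) j =
      if p.getD j 0 > m1 then (some (p.getD j 0), some m1, (j : Int))
      else if p.getD j 0 > m2 then (some m1, some (p.getD j 0), arg)
      else (some m1, some m2, arg) := by
  by_cases h1 : p.getD j 0 > m1 <;> by_cases h2 : p.getD j 0 > m2 <;> simp [pvTop2Step]

-- B's top-2 scan followed by the assignment pass produces exactly A's per-cell three-way maxima
set_option maxRecDepth 10000 in
lemma stepB_eq_inner (p row : List Int) : pvStepB p row = pvInner p row [0,0,0,0] := by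
  have hR : pvInner p row [0,0,0,0] =
    [max (max (p.getD 1 0) (p.getD 2 0)) (p.getD 3 0) + row.getD 0 0,
     max (max (p.getD 0 0) (p.getD 2 0)) (p.getD 3 0) + row.getD 1 0,
     max (max (p.getD 0 0) (p.getD 1 0)) (p.getD 3 0) + row.getD 2 0,
     max (max (p.getD 0 0) (p.getD 1 0)) (p.getD 2 0) + row.getD 3 0] := rfl
  rw [hR]
  simp only [pvStepB, show List.range 4 = [0,1,2,3] from rfl, List.foldl_cons, List.foldl_nil,
    top2_step0, top2_step1]
  split_ifs with h1 <;> simp only [top2_full] <;> split_ifs <;>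
    simp only [top2_full] <;> split_ifs <;> norm_num <;>
    (simp only [List.getD] at *) <;> omega

lemma getD_set_self (l : List (List Int)) (i : Nat) (v : List Int) (h : i < l.length) :
    (l.set i v).getD i [] = v := by
  simp [List.getD, h]

lemma getD_set_ne (l : List (List Int)) (i t : Nat) (v : List Int) (h : i ≠ t) :
    (l.set i v).getD t [] = l.getD t [] := by
  simp [List.getD, List.getElem?_set_ne, h]

-- A's fold over row indices, read at the last written slot, is B's fold over the rows themselves
lemma foldA (land : List (List Int)) : ∀ (k i : Nat) (dp : List (List Int)) (p : List Int),
    1 ≤ i → i + k ≤ dp.length → dp.getD (i-1) [] = p →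
    (∀ t ∈ List.range' i k, dp.getD t [] = [0,0,0,0]) →
    ((List.range' i k).foldl (fun dp i =>
        dp.set i (pvInner (dp.getD (i-1) []) (land.getD i []) (dp.getD i []))) dp).getD (i+k-1) []
      = ((List.range' i k).map (fun t => land.getD t [])).foldl (fun p row => pvInner p row [0,0,0,0]) p := by
  intro k
  induction k with
  | zero => intro i dp p h1 _ hp _; simpa using hp
  | succ k ih =>
    intro i dp p h1 hlen hp h4
    rw [List.range'_succ, List.foldl_cons, List.map_cons, List.foldl_cons]
    have hi : i < dp.length := by omega
    have hzero : dp.getD i [] = [0,0,0,0] := h4 i (by rw [List.range'_succ]; exact List.mem_cons_self)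
    rw [hp, hzero]
    have := ih (i+1) (dp.set i (pvInner p (land.getD i []) [0,0,0,0]))
      (pvInner p (land.getD i []) [0,0,0,0]) (by omega) (by simpa using (by omega : (i+1)+k ≤ dp.length))
      (by simpa using getD_set_self dp i _ hi)
      (by
        intro t ht
        have htm : t ∈ List.range' i (k+1) := by
          rw [List.range'_succ]; exact List.mem_cons_of_mem _ ht
        have hne : i ≠ t := by
          have := List.mem_range'_1.mp ht; omega
        rw [getD_set_ne _ _ _ _ hne]; exact h4 t htm)
    have harith : (i+1)+k-1 = i+(k+1)-1 := by omega
    rw [harith] at this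
    exact this

lemma map_range_getD (xs : List (List Int)) (d : List Int) :
    (List.range xs.length).map (fun t => xs.getD t d) = xs := by
  induction xs with
  | nil => simp
  | cons x xs ih =>
    simp only [List.length_cons, List.range_succ_eq_map, List.map_cons, List.map_map]
    simpa [Function.comp_def] using ih

lemma rows_eq (r0 : List Int) (rest : List (List Int)) :
    (List.range' 1 rest.length).map (fun t => ((r0 :: rest) : List (List Int)).getD t []) = rest := by
  have hr : List.range' 1 rest.length = (List.range rest.length).map (1 + ·) := by
    rw [List.range_eq_range', List.map_add_range']
  rw [hr, List.map_map]
  have : ((fun t => ((r0 :: rest) : List (List Int)).getD t []) ∘ (1 + ·))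
      = fun t => rest.getD t [] := by
    funext t; simp [Nat.add_comm 1 t]
  rw [this, map_range_getD]

lemma getD_init (rest : List (List Int)) (t : Nat) (ht : t ∈ List.range' 1 rest.length) :
    (((List.range rest.length).map (fun _ => ([0,0,0,0] : List Int))).getD (t-1) []) = [0,0,0,0] := by
  have h := List.mem_range'_1.mp ht
  have hlt : t - 1 < rest.length := by omega
  simp [List.getD, hlt]

-- ===== VERDICT (by name: the statement is the Claim_ definition above) =====
theorem solution_spec : Claim_equal_solution := by
  intro land _ hpre
  unfold Spec_solution
  cases land with
  | nil =>
    rcases hpre with ⟨h, _⟩ | ⟨h, _⟩ <;> simp at h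
  | cons r0 rest =>
    show solution (r0 :: rest) = solution_alt (r0 :: rest)
    have hA : solution (r0 :: rest)
        = (PySem.List.max? (rest.foldl (fun p row => pvInner p row [0,0,0,0]) r0) (fun x => x)).getD 0 := by
      unfold solution
      simp only [List.length_cons, Nat.add_sub_cancel, List.singleton_append]
      have hdp0 : (PySem.List.pyGet? (r0 :: rest) 0).getD [] = r0 := by
        simp [PySem.List.pyGet?, PySem.List.pyIdx?]
      rw [hdp0]
      have hfold := foldA (r0 :: rest) rest.length 1
        (r0 :: (List.range rest.length).map (fun _ => ([0,0,0,0] : List Int))) r0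
        (by omega) (by simp; omega) (by simp)
        (by
          intro t ht
          have h := List.mem_range'_1.mp ht
          have ht1 : t - 1 + 1 = t := by omega
          rw [show (r0 :: (List.range rest.length).map (fun _ => ([0,0,0,0] : List Int))).getD t []
              = ((List.range rest.length).map (fun _ => ([0,0,0,0] : List Int))).getD (t-1) [] by
            rw [← ht1, List.getD_cons_succ, ht1]]
          exact getD_init rest t ht)
      rw [show (1 : Nat) + rest.length - 1 = rest.length by omega] at hfold
      rw [hfold, rows_eq]
    have hB : solution_alt (r0 :: rest)
        = (PySem.List.max? (rest.foldl (fun p row => pvInner p row [0,0,0,0]) r0) (fun x => x)).getD 0 := by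
      unfold solution_alt
      simp only [List.drop_succ_cons, List.drop_zero, List.headD_cons, stepB_eq_inner]
    rw [hA, hB]
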